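-- pv_equiv track=rewrite | github.com/tcosmo/groupeModulaire | enlacement.py | cross_word
-- ===== SOURCE A (Python) =====
-- def orderlex(l1, l2, n1, n2):
--     """ lexicographic order on infinite words, returns :
--     0 if the n1-th shift of l1^infty is smaller than the n2-th shift of l2^infty, 1 if it is larger, and 2 if the two words coincide
--     (this can be determined by looking only length(l1)+length(l2) letters since u^infty = v^infty iff uv = vu).
--     """
--     i = 0
--     while( (l1[(i+n1)%len(l1)] == l2[(i+n2)%len(l2)]) & (i <= (len(l1)+len(l2))) ):
--         i = i+1
--     if l1[(i+n1)%len(l1)] < l2[(i+n2)%len(l2)]: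
--         return 0
--     else:
--         if l1[(i+n1)%len(l1)] > l2[(i+n2)%len(l2)]:
--             return 1
--         else:
--             return 2
--
-- def cross_word(w1, w2):
--     """ Same as before with L and T words """
--     c = 0
--     for i in range(len(w1)):
--         for j in range(len(w2)):
--             if ( (w1[i] == 'L') & (w2[j] == 'T') & (orderlex(w1,w2,i+1,j+1) == 1) ):
--                 c = c+1
--             if ( (w1[i] == 'T') & (w2[j] == 'L') & (orderlex(w1,w2,i+1,j+1) == 0) ):
--                 c = c+1
--     return c
-- ===== SOURCE B (Python) =====
-- def cross_word(w1, w2):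
--     """Same count, but: precompute for every shift its (n1+n2+2)-letter expansion
--     (enough letters to decide the infinite-word comparison), sort the distinct
--     expansions once to assign integer ranks, then count pairs with O(1) integer
--     comparisons instead of re-scanning the words for every pair."""
--     n1, n2 = len(w1), len(w2)
--     m = n1 + n2 + 2
--     keys1 = [''.join(w1[(i + 1 + k) % n1] for k in range(m)) for i in range(n1)]
--     keys2 = [''.join(w2[(j + 1 + k) % n2] for k in range(m)) for j in range(n2)]
--     order = sorted(set(keys1 + keys2))
--     rank = {key: r for r, key in enumerate(order)}
--     r1 = [rank[k] for k in keys1]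
--     r2 = [rank[k] for k in keys2]
--     c = 0
--     for i in range(n1):
--         for j in range(n2):
--             if w1[i] == 'L' and w2[j] == 'T' and r1[i] > r2[j]:
--                 c = c + 1
--             if w1[i] == 'T' and w2[j] == 'L' and r1[i] < r2[j]:
--                 c = c + 1
--     return c
-- ===== Notes on version B (the rewrite author's own statement) =====
-- stated objective: faster
-- what changed: Instead of rescanning both words letter-by-letter for every (i,j) pair (orderlex), B precomputes for every shift its (n1+n2+2)-letter expansion, sorts the distinct expansions once to assign each shift an integer rank, and then counts crossings with O(1) integer comparisons per pair.
import Mathlib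
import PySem

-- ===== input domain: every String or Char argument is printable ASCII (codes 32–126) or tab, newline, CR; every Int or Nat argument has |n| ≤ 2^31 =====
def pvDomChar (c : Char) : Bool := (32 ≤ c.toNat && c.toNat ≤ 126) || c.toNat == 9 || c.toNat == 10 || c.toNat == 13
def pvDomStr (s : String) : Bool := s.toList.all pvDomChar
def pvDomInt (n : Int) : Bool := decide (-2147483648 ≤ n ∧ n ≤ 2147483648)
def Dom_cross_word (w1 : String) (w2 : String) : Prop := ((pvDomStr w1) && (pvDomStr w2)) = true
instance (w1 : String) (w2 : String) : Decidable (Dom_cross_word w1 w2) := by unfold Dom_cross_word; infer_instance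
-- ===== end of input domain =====

-- B replaces A's per-pair infinite-word rescanning by shift expansions precomputed,
-- sorted and ranked once, so each pair test is one integer comparison (objective: faster).

-- ===== PORT A =====
-- l[(i+s) % len(l)]; the index is always in range when l ≠ [] (the only way A reaches it), so getD is exact there
def olChar (l : List Char) (s : Nat) (i : Nat) : Char := l.getD ((i + s) % l.length) ' '

-- the 'while' of orderlex; it runs at most L+1 times (it needs i ≤ L), so fuel L+2 never runs out
def olLoop (l1 l2 : List Char) (s1 s2 L : Nat) : Nat → Nat → Nat
  | i, 0 => i
  | i, fuel+1 =>
      if olChar l1 s1 i = olChar l2 s2 i ∧ i ≤ L then olLoop l1 l2 s1 s2 L (i+1) fuel else i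

def orderlex (l1 l2 : List Char) (s1 s2 : Nat) : Nat :=
  let L := l1.length + l2.length
  let i := olLoop l1 l2 s1 s2 L 0 (L + 2)
  if olChar l1 s1 i < olChar l2 s2 i then 0
  else if olChar l2 s2 i < olChar l1 s1 i then 1
  else 2

def cross_word (w1 : String) (w2 : String) : Int :=
  let l1 := w1.toList
  let l2 := w2.toList
  (List.range l1.length).foldl (fun c i =>
    (List.range l2.length).foldl (fun c j =>
      let c := if l1.getD i ' ' = 'L' ∧ l2.getD j ' ' = 'T' ∧ orderlex l1 l2 (i+1) (j+1) = 1 then c + 1 else c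
      if l1.getD i ' ' = 'T' ∧ l2.getD j ' ' = 'L' ∧ orderlex l1 l2 (i+1) (j+1) = 0 then c + 1 else c) c) 0

-- ===== PORT B =====
-- the m-letter expansion of the s-th shift of l^infty (Source B's keys)
def keyOf (l : List Char) (m s : Nat) : List Char :=
  (List.range m).map (fun k => l.getD ((s + k) % l.length) ' ')

def cross_word_alt (w1 : String) (w2 : String) : Int :=
  let l1 := w1.toList
  let l2 := w2.toList
  let n1 := l1.length
  let n2 := l2.length
  let m := n1 + n2 + 2
  let keys1 := (List.range n1).map (fun i => keyOf l1 m (i+1))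
  let keys2 := (List.range n2).map (fun j => keyOf l2 m (j+1))
  let order := PySem.List.sorted (PySem.Set.ofList (keys1 ++ keys2)) (fun x => x) false
  let rank := (PySem.List.enumerate order 0).foldl (fun d p => d.insert p.2 p.1) PySem.Dict.empty
  let r1 := keys1.map (fun k => rank.getD k 0)
  let r2 := keys2.map (fun k => rank.getD k 0)
  (List.range n1).foldl (fun c i =>
    (List.range n2).foldl (fun c j =>
      let c := if l1.getD i ' ' = 'L' ∧ l2.getD j ' ' = 'T' ∧ r2.getD j (0:Int) < r1.getD i (0:Int) then c + 1 else c
      if l1.getD i ' ' = 'T' ∧ l2.getD j ' ' = 'L' ∧ r1.getD i (0:Int) < r2.getD j (0:Int) then c + 1 else c) c) 0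

-- ===== PRECONDITION & SPEC =====
def Spec_cross_word (w1 : String) (w2 : String) (out : Int) : Prop := out = cross_word_alt w1 w2
instance (w1 : String) (w2 : String) (out : Int) : Decidable (Spec_cross_word w1 w2 out) := by unfold Spec_cross_word; infer_instance

-- ===== CLAIM (what is proved, stated in full; the proofs are below) =====
def Claim_equal_cross_word : Prop := ∀ (w1 : String) (w2 : String), Dom_cross_word w1 w2 → Spec_cross_word w1 w2 (cross_word w1 w2)

-- ===== LEMMAS AND PROOFS =====

-- equal prefix then a smaller letter ⇒ lexicographically smaller (equal-length lists)
lemma lt_of_mismatch : ∀ (t : Nat) (a b : List Char) (hlen : a.length = b.length)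
    (ht : t < a.length), (∀ j (hj : j < t), a[j]'(by omega) = b[j]'(by omega)) →
    a[t]'ht < b[t]'(by omega) → a < b := by
  intro t
  induction t with
  | zero =>
    intro a b hlen ht hpre h
    match a, b with
    | x :: a', y :: b' =>
      simp only [List.getElem_cons_zero] at h
      simp [List.cons_lt_cons_iff]
      left; exact h
  | succ t ih =>
    intro a b hlen ht hpre h
    match a, b with
    | x :: a', y :: b' =>
      have hx : x = y := hpre 0 (by omega)
      subst hx
      simp only [List.cons_lt_cons_iff]
      right
      refine ⟨by trivial, ih a' b' (by simpa using hlen) (by simpa using ht) ?_ (by simpa using h)⟩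
      intro j hj
      have := hpre (j+1) (by omega)
      simpa using this

-- the loop stops at the first mismatch (or at L+1)
lemma olLoop_spec (l1 l2 : List Char) (s1 s2 L : Nat) :
    ∀ (fuel i : Nat), (∀ j, j < i → olChar l1 s1 j = olChar l2 s2 j) → i ≤ L + 1 → L + 1 < i + fuel →
    (∀ j, j < olLoop l1 l2 s1 s2 L i fuel → olChar l1 s1 j = olChar l2 s2 j) ∧
    olLoop l1 l2 s1 s2 L i fuel ≤ L + 1 ∧
    (olChar l1 s1 (olLoop l1 l2 s1 s2 L i fuel) = olChar l2 s2 (olLoop l1 l2 s1 s2 L i fuel) →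
      olLoop l1 l2 s1 s2 L i fuel = L + 1) := by
  intro fuel
  induction fuel with
  | zero => intro i _ _ h; omega
  | succ fuel ih =>
    intro i hpre hi hf
    by_cases hc : olChar l1 s1 i = olChar l2 s2 i ∧ i ≤ L
    · have hstep : olLoop l1 l2 s1 s2 L i (fuel+1) = olLoop l1 l2 s1 s2 L (i+1) fuel := by
        simp [olLoop, hc]
      rw [hstep]
      refine ih (i+1) ?_ (by omega) (by omega)
      intro j hj
      rcases Nat.lt_succ_iff_lt_or_eq.mp hj with h | h
      · exact hpre j h
      · subst h; exact hc.1
    · have hstep : olLoop l1 l2 s1 s2 L i (fuel+1) = i := by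
        simp only [olLoop, if_neg hc]
      rw [hstep]
      refine ⟨hpre, hi, fun he => ?_⟩
      rcases Decidable.not_and_iff_not_or_not.mp hc with h | h
      · exact absurd he h
      · omega

lemma keyOf_eq_map (l : List Char) (m s : Nat) :
    keyOf l m s = (List.range m).map (fun k => olChar l s k) := by
  unfold keyOf olChar
  apply List.map_congr_left
  intro k _
  rw [Nat.add_comm]

-- orderlex is decided by comparing the two (L+2)-letter expansions
lemma orderlex_char (l1 l2 : List Char) (s1 s2 : Nat) :
    (orderlex l1 l2 s1 s2 = 1 ↔ keyOf l2 (l1.length + l2.length + 2) s2 < keyOf l1 (l1.length + l2.length + 2) s1) ∧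
    (orderlex l1 l2 s1 s2 = 0 ↔ keyOf l1 (l1.length + l2.length + 2) s1 < keyOf l2 (l1.length + l2.length + 2) s2) := by
  set L := l1.length + l2.length with hL
  set m := L + 2 with hm
  set r := olLoop l1 l2 s1 s2 L 0 (L + 2) with hr
  obtain ⟨hpre, hle, heq⟩ := olLoop_spec l1 l2 s1 s2 L (L + 2) 0 (by omega) (by omega) (by omega)
  rw [keyOf_eq_map, keyOf_eq_map]
  set K1 := (List.range m).map (fun k => olChar l1 s1 k) with hK1
  set K2 := (List.range m).map (fun k => olChar l2 s2 k) with hK2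
  have hlen1 : K1.length = m := by simp [hK1]
  have hlen2 : K2.length = m := by simp [hK2]
  have hg1 : ∀ j (hj : j < m), K1[j]'(by omega) = olChar l1 s1 j := by
    intro j hj; simp [hK1]
  have hg2 : ∀ j (hj : j < m), K2[j]'(by omega) = olChar l2 s2 j := by
    intro j hj; simp [hK2]
  have hrm : r < m := by omega
  rcases lt_trichotomy (olChar l1 s1 r) (olChar l2 s2 r) with h | h | h
  · have hlt : K1 < K2 := by
      apply lt_of_mismatch r K1 K2 (by omega) (by omega)
      · intro j hj; rw [hg1 j (by omega), hg2 j (by omega)]; exact hpre j hj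
      · rw [hg1 r (by omega), hg2 r (by omega)]; exact h
    have hol : orderlex l1 l2 s1 s2 = 0 := by
      unfold orderlex; dsimp only; rw [← hL, ← hr, if_pos h]
    rw [hol]
    exact ⟨by simp [lt_asymm hlt], by simp [hlt]⟩
  · have hr1 : r = L + 1 := heq h
    have hKeq : K1 = K2 := by
      apply List.ext_getElem (by omega)
      intro j hj _
      rw [hg1 j (by omega), hg2 j (by omega)]
      rcases Nat.lt_or_ge j r with hc | hc
      · exact hpre j hc
      · have : j = r := by omega
        subst this; exact h
    have hol : orderlex l1 l2 s1 s2 = 2 := by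
      unfold orderlex; dsimp only; rw [← hL, ← hr, if_neg (by simp [h]), if_neg (by simp [h])]
    rw [hol, hKeq]
    simp
  · have hlt : K2 < K1 := by
      apply lt_of_mismatch r K2 K1 (by omega) (by omega)
      · intro j hj; rw [hg1 j (by omega), hg2 j (by omega)]; exact (hpre j hj).symm
      · rw [hg1 r (by omega), hg2 r (by omega)]; exact h
    have hol : orderlex l1 l2 s1 s2 = 1 := by
      unfold orderlex; dsimp only; rw [← hL, ← hr, if_neg (by simp [asymm h]), if_pos h]
    rw [hol]
    exact ⟨by simp [hlt], by simp [lt_asymm hlt]⟩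

-- the rank dict never touches keys it was not built from
lemma rank_get?_notmem (l : List (List Char)) (k : List Char) (hk : k ∉ l) :
    ∀ (s : Int) (d : PySem.Dict (List Char) Int),
    ((PySem.List.enumerate l s).foldl (fun d p => d.insert p.2 p.1) d).get? k = d.get? k := by
  induction l with
  | nil => intro s d; simp [PySem.List.enumerate_nil]
  | cons x t ih =>
    intro s d
    rw [PySem.List.enumerate_cons]
    simp only [List.foldl_cons]
    rw [ih (by simp at hk; exact hk.2) (s+1)]
    exact PySem.Dict.get?_insert_of_ne d s (by simp at hk; exact hk.1)

-- the rank dict maps each key of the (nodup) order list to its position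
lemma rank_get?_mem (l : List (List Char)) (hnd : l.Nodup) (k : List Char) (hk : k ∈ l) :
    ∀ (s : Int) (d : PySem.Dict (List Char) Int),
    ((PySem.List.enumerate l s).foldl (fun d p => d.insert p.2 p.1) d).get? k = some (s + (l.idxOf k : Int)) := by
  induction l with
  | nil => simp at hk
  | cons x t ih =>
    intro s d
    rw [PySem.List.enumerate_cons]
    simp only [List.foldl_cons]
    by_cases hx : k = x
    · subst hx
      have hkt : k ∉ t := by simp at hnd; exact hnd.1
      rw [rank_get?_notmem t k hkt (s+1)]
      rw [PySem.Dict.get?_insert_self]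
      simp [List.idxOf_cons_self]
    · have hkt : k ∈ t := by rcases List.mem_cons.mp hk with h | h; exact absurd h hx; exact h
      rw [ih (by simp at hnd; exact hnd.2) hkt (s+1)]
      have : (x :: t).idxOf k = t.idxOf k + 1 := by
        rw [List.idxOf_cons_ne _ (by exact fun h => hx h.symm)]
      rw [this]
      push_cast
      ring_nf

-- positions in a strictly increasing list compare like their elements
lemma idxOf_lt_iff (l : List (List Char)) (hp : l.Pairwise (· < ·)) (a b : List Char)
    (ha : a ∈ l) (hb : b ∈ l) : l.idxOf a < l.idxOf b ↔ a < b := by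
  have hget := List.pairwise_iff_getElem.mp hp
  have hia := List.idxOf_lt_length_of_mem ha
  have hib := List.idxOf_lt_length_of_mem hb
  have hga : l[l.idxOf a]'hia = a := List.getElem_idxOf hia
  have hgb : l[l.idxOf b]'hib = b := List.getElem_idxOf hib
  constructor
  · intro h
    have := hget _ _ hia hib h
    rwa [hga, hgb] at this
  · intro h
    rcases Nat.lt_trichotomy (l.idxOf a) (l.idxOf b) with hc | hc | hc
    · exact hc
    · exfalso
      have hab : a = b := by rw [← hga, ← hgb]; simp [hc]
      exact lt_irrefl a (hab ▸ h)
    · exfalso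
      have := hget _ _ hib hia hc
      rw [hga, hgb] at this
      exact lt_asymm h this

-- comparing two keys through Source B's rank dict is comparing the keys themselves
lemma order_rank (xs : List (List Char)) (a b : List Char) (ha : a ∈ xs) (hb : b ∈ xs) :
    ((((PySem.List.enumerate (PySem.List.sorted (PySem.Set.ofList xs) (fun x => x) false) 0).foldl
        (fun d p => d.insert p.2 p.1) PySem.Dict.empty).getD a 0 <
      ((PySem.List.enumerate (PySem.List.sorted (PySem.Set.ofList xs) (fun x => x) false) 0).foldl
        (fun d p => d.insert p.2 p.1) PySem.Dict.empty).getD b 0) ↔ a < b) := by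
  set order := PySem.List.sorted (PySem.Set.ofList xs) (fun x => x) false with horder
  have hnd : order.Nodup := ((PySem.List.sorted_perm _ _ _).nodup_iff).mpr (PySem.Set.nodup_ofList xs)
  have hma : a ∈ order := (PySem.List.mem_sorted _ _ _ _).mpr ((PySem.Set.mem_ofList _ _).mpr ha)
  have hmb : b ∈ order := (PySem.List.mem_sorted _ _ _ _).mpr ((PySem.Set.mem_ofList _ _).mpr hb)
  have hga := rank_get?_mem order hnd a hma 0 PySem.Dict.empty
  have hgb := rank_get?_mem order hnd b hmb 0 PySem.Dict.empty
  simp only [PySem.Dict.getD, hga, hgb, Option.getD_some, zero_add, Nat.cast_lt]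
  refine idxOf_lt_iff order ?_ a b hma hmb
  rw [horder]
  have := PySem.List.sorted_ofList_pairwise_lt (κ := List Char) xs
  convert this using 2

-- ===== VERDICT (by name: the statement is the Claim_ definition above) =====
theorem cross_word_spec : Claim_equal_cross_word := by
  intro w1 w2 _
  unfold Spec_cross_word cross_word cross_word_alt
  dsimp only
  set l1 := w1.toList with hl1
  set l2 := w2.toList with hl2
  set n1 := l1.length with hn1
  set n2 := l2.length with hn2
  set m := n1 + n2 + 2 with hmm
  set keys1 := (List.range n1).map (fun i => keyOf l1 m (i+1)) with hkeys1
  set keys2 := (List.range n2).map (fun j => keyOf l2 m (j+1)) with hkeys2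
  set rank := (PySem.List.enumerate (PySem.List.sorted (PySem.Set.ofList (keys1 ++ keys2)) (fun x => x) false) 0).foldl
      (fun d p => d.insert p.2 p.1) PySem.Dict.empty with hrank
  apply PySem.List.foldl_congr_mem
  intro c i hi
  apply PySem.List.foldl_congr_mem
  intro c' j hj
  rw [List.mem_range] at hi hj
  have hr1 : (keys1.map (fun k => rank.getD k 0)).getD i (0:Int) = rank.getD (keyOf l1 m (i+1)) 0 := by
    rw [hkeys1, List.map_map, PySem.List.getD_map_range _ _ _ _ hi]
    rfl
  have hr2 : (keys2.map (fun k => rank.getD k 0)).getD j (0:Int) = rank.getD (keyOf l2 m (j+1)) 0 := by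
    rw [hkeys2, List.map_map, PySem.List.getD_map_range _ _ _ _ hj]
    rfl
  have hm1 : keyOf l1 m (i+1) ∈ keys1 ++ keys2 := by
    apply List.mem_append_left
    rw [hkeys1]
    exact List.mem_map.mpr ⟨i, List.mem_range.mpr hi, rfl⟩
  have hm2 : keyOf l2 m (j+1) ∈ keys1 ++ keys2 := by
    apply List.mem_append_right
    rw [hkeys2]
    exact List.mem_map.mpr ⟨j, List.mem_range.mpr hj, rfl⟩
  have h1 : (orderlex l1 l2 (i+1) (j+1) = 1) ↔
      ((keys2.map (fun k => rank.getD k 0)).getD j (0:Int) < (keys1.map (fun k => rank.getD k 0)).getD i (0:Int)) := by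
    rw [hr1, hr2, hrank]
    rw [order_rank (keys1 ++ keys2) _ _ hm2 hm1]
    exact (orderlex_char l1 l2 (i+1) (j+1)).1
  have h0 : (orderlex l1 l2 (i+1) (j+1) = 0) ↔
      ((keys1.map (fun k => rank.getD k 0)).getD i (0:Int) < (keys2.map (fun k => rank.getD k 0)).getD j (0:Int)) := by
    rw [hr1, hr2, hrank]
    rw [order_rank (keys1 ++ keys2) _ _ hm1 hm2]
    exact (orderlex_char l1 l2 (i+1) (j+1)).2
  simp only [h1, h0]
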